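-- pv_equiv track=rewrite | github.com/oliwiakaluzinska/prg-basics | 04-Functions/7-15.py | f
-- ===== SOURCE A (Python) =====
-- def f(detector):
--     room = 0
--     for i in detector:
--         if i == "+":
--             room += 1
--         elif i == "-":
--             room -= 1
--
--         if room >= 3:
--             return True
--
--     return False
-- ===== SOURCE B (Python) =====
-- def f(detector):
--     # Right-to-left scan computing the maximum prefix-sum of deltas via
--     # best = max(d, d + best); the counter ever reaches 3 iff that max >= 3.
--     best = None
--     for c in reversed(detector):
--         d = 1 if c == "+" else (-1 if c == "-" else 0)
--         best = d if best is None else max(d, d + best)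
--     return best is not None and best >= 3
-- ===== Notes on version B (the rewrite author's own statement) =====
-- stated objective: alternative
-- what changed: Replaced the left-to-right running counter with early return by a right-to-left fold computing the maximum prefix sum of the +/- deltas (best = max(d, d + best)), then a single comparison of that maximum against 3.
import Mathlib
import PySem

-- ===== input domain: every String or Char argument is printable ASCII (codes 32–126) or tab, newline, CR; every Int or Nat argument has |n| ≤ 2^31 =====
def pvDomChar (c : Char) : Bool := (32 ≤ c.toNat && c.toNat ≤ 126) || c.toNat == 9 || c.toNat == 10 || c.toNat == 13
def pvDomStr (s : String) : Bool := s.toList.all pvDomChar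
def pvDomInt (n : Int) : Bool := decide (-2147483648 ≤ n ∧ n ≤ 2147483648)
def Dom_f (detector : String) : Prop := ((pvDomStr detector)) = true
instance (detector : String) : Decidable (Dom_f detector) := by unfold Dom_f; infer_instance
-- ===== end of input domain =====

-- B replaces A's left-to-right counter with an early return by a right-to-left fold
-- computing the maximum prefix sum of the +/- deltas, compared once against 3.

-- ===== PORT A =====
-- loop with early return: carries the running 'room' counter
def fLoop : List Char → Int → Bool
  | [], _ => false
  | c :: rest, room =>
    let room' := if c = '+' then room + 1 else if c = '-' then room - 1 else room
    if room' ≥ 3 then true else fLoop rest room'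

def f (detector : String) : Bool := fLoop detector.toList 0

-- ===== PORT B =====
-- delta of one character
def fDelta (c : Char) : Int := if c = '+' then 1 else if c = '-' then -1 else 0

-- right-to-left scan: 'best' is the maximum prefix sum of the processed suffix
-- (none before any character is processed); transliterates Source B's reversed loop
-- as structural recursion on the list (processing the head last = leftmost first,
-- i.e. the same right-to-left recurrence best = max(d, d + best)).
def fBest : List Char → Option Int
  | [] => none
  | c :: rest =>
    let d := fDelta c
    match fBest rest with
    | none => some d
    | some b => some (max d (d + b))

def f_alt (detector : String) : Bool :=
  match fBest detector.toList with
  | none => false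
  | some b => decide (b ≥ 3)

-- ===== PRECONDITION & SPEC =====
def Spec_f (detector : String) (out : Bool) : Prop := out = f_alt detector
instance (detector : String) (out : Bool) : Decidable (Spec_f detector out) := by unfold Spec_f; infer_instance

-- ===== CLAIM (what is proved, stated in full; the proofs are below) =====
def Claim_equal_f : Prop := ∀ (detector : String), Dom_f detector → Spec_f detector (f detector)

-- ===== LEMMAS AND PROOFS =====
theorem fLoop_eq_best (cs : List Char) (room : Int) :
    fLoop cs room = (match fBest cs with
                     | none => false
                     | some b => decide (room + b ≥ 3)) := by
  induction cs generalizing room with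
  | nil => simp [fLoop, fBest]
  | cons c rest ih =>
    have hstep : (if c = '+' then room + 1 else if c = '-' then room - 1 else room)
        = room + fDelta c := by
      unfold fDelta; split_ifs <;> omega
    simp only [fLoop, fBest, hstep, ih]
    cases h : fBest rest with
    | none =>
      by_cases hc : room + fDelta c ≥ 3 <;> simp [hc]
    | some b =>
      by_cases hc : room + fDelta c ≥ 3
      · simp only [if_pos hc]
        have : room + max (fDelta c) (fDelta c + b) ≥ 3 := by
          have := le_max_left (fDelta c) (fDelta c + b); omega
        simp [this]
      · simp only [if_neg hc]
        have : (room + fDelta c + b ≥ 3) ↔ (room + max (fDelta c) (fDelta c + b) ≥ 3) := by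
          rcases max_cases (fDelta c) (fDelta c + b) with ⟨h1, h2⟩ | ⟨h1, h2⟩ <;> omega
        simp [this]

-- ===== VERDICT (by name: the statement is the Claim_ definition above) =====
theorem f_spec : Claim_equal_f := by
  intro detector _
  unfold Spec_f f f_alt
  rw [fLoop_eq_best]
  cases fBest detector.toList <;> simp
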